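-- pv_equiv track=rewrite | github.com/bilisim1995/mevzuatgpt-server | services/query_service.py | fix_markdown_formatting
-- ===== SOURCE A (Python) =====
-- def fix_markdown_formatting(text: str) -> str:
--     """
--     Post-process AI response to ensure proper markdown formatting.
--     Adds blank lines before headings if missing.
--
--     Args:
--         text: AI-generated markdown text
--
--     Returns:
--         Properly formatted markdown text
--     """
--     if not text:
--         return text
--
--     lines = text.split('\n')
--     fixed_lines = []
--
--     for i, line in enumerate(lines):
--         # Check if current line is a heading (starts with ##)
--         is_heading = line.strip().startswith('##')
--
--         if is_heading and i > 0:
--             # Get previous line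
--             prev_line = lines[i-1].strip()
--
--             # If previous line is not empty, add blank line before heading
--             if prev_line and not prev_line.startswith('##'):
--                 # Check if the line before this in fixed_lines is already empty
--                 if fixed_lines and fixed_lines[-1].strip():
--                     fixed_lines.append('')  # Add blank line
--
--         fixed_lines.append(line)
--
--     return '\n'.join(fixed_lines)
-- ===== SOURCE B (Python) =====
-- def fix_markdown_formatting(text: str) -> str:
--     """Staged: find the heading indices that need a blank line, cut the line
--     list into sections at those boundaries, and join the sections with a
--     blank line ('\n\n') while lines inside a section keep single '\n'."""
--     if not text:
--         return text
--
--     lines = text.split('\n')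
--
--     def boundary(i):
--         prev, cur = lines[i - 1].strip(), lines[i].strip()
--         return cur.startswith('##') and bool(prev) and not prev.startswith('##')
--
--     cuts = [i for i in range(1, len(lines)) if boundary(i)]
--
--     sections = []
--     start = 0
--     for c in cuts:
--         sections.append(lines[start:c])
--         start = c
--     sections.append(lines[start:])
--
--     return '\n\n'.join('\n'.join(s) for s in sections)
-- ===== Notes on version B (the rewrite author's own statement) =====
-- stated objective: alternative
-- what changed: Instead of A's single indexed pass that appends lines (and inserted blanks) to an accumulator, B first computes the list of boundary indices where a blank is needed, slices the line list into sections at those boundaries, and joins the sections with '\n\n' (lines inside a section with '\n').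
import Mathlib
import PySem

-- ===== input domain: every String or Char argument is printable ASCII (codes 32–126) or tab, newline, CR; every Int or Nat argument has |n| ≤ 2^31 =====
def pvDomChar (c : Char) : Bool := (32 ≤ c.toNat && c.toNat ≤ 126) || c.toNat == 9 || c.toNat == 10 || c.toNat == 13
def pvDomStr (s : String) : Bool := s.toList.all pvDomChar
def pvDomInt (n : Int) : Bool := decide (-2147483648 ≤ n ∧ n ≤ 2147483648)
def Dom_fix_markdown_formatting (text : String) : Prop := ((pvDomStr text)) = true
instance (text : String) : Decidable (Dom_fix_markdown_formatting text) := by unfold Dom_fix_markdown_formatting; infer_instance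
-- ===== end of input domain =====

-- B replaces A's single accumulator pass with a staged algorithm: compute the
-- boundary indices, slice the line list into sections there, and join the
-- sections with a blank line (objective: alternative; same result proved below).

-- ===== PORT A =====
-- A's loop body (the statements inside `for i, line in enumerate(lines):`).
def pvStepA (lines : List String) (fixed_lines : List String) (il : Int × String) : List String :=
  let i := il.1
  let line := il.2
  let is_heading := PySem.Str.startswith (PySem.Str.strip line) "##"
  let fixed_lines :=
    if is_heading && decide (0 < i) then
      let prev_line := PySem.Str.strip (PySem.List.pyGetD lines (i - 1) "")
      if prev_line != "" && !PySem.Str.startswith prev_line "##" then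
        if !fixed_lines.isEmpty &&
            PySem.Str.strip (PySem.List.pyGetD fixed_lines (-1) "") != "" then
          fixed_lines ++ [""]
        else fixed_lines
      else fixed_lines
    else fixed_lines
  fixed_lines ++ [line]

def fix_markdown_formatting (text : String) : String :=
  if text = "" then text
  else
    let lines := (PySem.Str.split? text "\n").getD []  -- sep "\n" ≠ "" so split? is `some`
    let fixed_lines := (PySem.List.enumerate lines).foldl (pvStepA lines) []
    PySem.Str.join "\n" fixed_lines

-- ===== PORT B =====
-- B's nested `boundary(i)` predicate.
def pvB (lines : List String) (i : Int) : Bool :=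
  let prev := PySem.Str.strip (PySem.List.pyGetD lines (i - 1) "")
  let cur := PySem.Str.strip (PySem.List.pyGetD lines i "")
  PySem.Str.startswith cur "##" && prev != "" && !PySem.Str.startswith prev "##"

def fix_markdown_formatting_alt (text : String) : String :=
  if text = "" then text
  else
    let lines := (PySem.Str.split? text "\n").getD []  -- sep "\n" ≠ "" so split? is `some`
    let cuts := (PySem.List.pyRange 1 (lines.length : Int)).foldl
      (fun acc i => if pvB lines i then acc ++ [i] else acc) []
    let st := cuts.foldl
      (fun (st : Int × List (List String)) c =>
        (c, st.2 ++ [PySem.List.slice lines (some st.1) (some c)])) ((0 : Int), [])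
    let sections := st.2 ++ [PySem.List.slice lines (some st.1) none]
    PySem.Str.join "\n\n" (sections.map (fun s => PySem.Str.join "\n" s))

-- ===== PRECONDITION & SPEC =====
def Spec_fix_markdown_formatting (text : String) (out : String) : Prop := out = fix_markdown_formatting_alt text
instance (text : String) (out : String) : Decidable (Spec_fix_markdown_formatting text out) := by unfold Spec_fix_markdown_formatting; infer_instance

-- ===== CLAIM (what is proved, stated in full; the proofs are below) =====
def Claim_equal_fix_markdown_formatting : Prop := ∀ (text : String), Dom_fix_markdown_formatting text → Spec_fix_markdown_formatting text (fix_markdown_formatting text)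

-- ===== LEMMAS AND PROOFS =====

-- A blank line is needed between line `p` and a following line `c` iff `c` is a
-- heading and `p` is non-blank and not itself a heading.
def pvNeed (p c : String) : Bool :=
  PySem.Str.startswith (PySem.Str.strip c) "##" &&
    (PySem.Str.strip p != "" && !PySem.Str.startswith (PySem.Str.strip p) "##")

-- The canonical output line list: insert "" before each line needing a blank.
def pvIns (p : String) : List String → List String
  | [] => []
  | c :: r => (if pvNeed p c then ["", c] else [c]) ++ pvIns c r

def pvCanon : List String → List String
  | [] => []
  | h :: t => h :: pvIns h t

-- Concatenate sections, putting a blank line between adjacent sections.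
def pvGlue : List (List String) → List String
  | [] => []
  | [s] => s
  | s :: t => s ++ "" :: pvGlue t

-- The section list B's slicing loop produces, as a recursion on the cut list.
def pvSeg (L : List String) : Int → List Int → List (List String)
  | s, [] => [PySem.List.slice L (some s) none]
  | s, c :: cs => PySem.List.slice L (some s) (some c) :: pvSeg L c cs

lemma pvSeg_ne_nil (L : List String) (s : Int) (cuts : List Int) :
    pvSeg L s cuts ≠ [] := by
  cases cuts <;> simp [pvSeg]

lemma pvGlue_cons (a : List String) (T : List (List String)) (hT : T ≠ []) :
    pvGlue (a :: T) = a ++ "" :: pvGlue T := by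
  cases T with
  | nil => exact absurd rfl hT
  | cons b R => rfl

lemma pvGlue_cons_head (x : String) (a : List String) (T : List (List String)) :
    pvGlue ((x :: a) :: T) = x :: pvGlue (a :: T) := by
  cases T with
  | nil => rfl
  | cons b R => rfl

lemma pvGlue_cons_ne_nil (b : List String) (R : List (List String)) (hb : b ≠ []) :
    pvGlue (b :: R) ≠ [] := by
  cases R with
  | nil => simpa [pvGlue] using hb
  | cons c R' => simp [pvGlue]

-- ---- A's fold produces the canonical line list ----

lemma stepA (L : List String) : ∀ (t : List String) (j : Nat) (p : String) (acc : List String),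
    L.drop j = t → 1 ≤ j → L[j-1]? = some p → acc ≠ [] → acc.getLast? = some p →
    (PySem.List.enumerate t (j : Int)).foldl (pvStepA L) acc = acc ++ pvIns p t := by
  intro t
  induction t with
  | nil => intro j p acc _ _ _ _ _; simp [PySem.List.enumerate_nil, pvIns]
  | cons c r ih =>
    intro j p acc hdrop hj hidx hne hlast
    have hjlen : j < L.length := by
      have h := congrArg List.length hdrop
      simp [List.length_drop] at h
      omega
    have hprev : PySem.List.pyGetD L ((j : Int) - 1) "" = p := by
      have hc : ((j : Int) - 1) = ((j - 1 : Nat) : Int) := by omega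
      rw [hc, PySem.List.pyGetD_natCast, List.getD_eq_getElem?_getD, hidx]
      rfl
    have hlastv : PySem.List.pyGetD acc (-1) "" = p := by
      rw [PySem.List.pyGetD_neg_one acc "" hne, ← Option.some_inj,
        ← List.getLast?_eq_some_getLast]
      exact hlast
    have hEmp : acc.isEmpty = false := by
      simp [List.isEmpty_eq_false_iff, hne]
    have h0j : decide ((0 : Int) < (j : Int)) = true := by
      simp; omega
    have hstep : pvStepA L acc ((j : Int), c) =
        acc ++ (if pvNeed p c then ["", c] else [c]) := by
      simp only [pvStepA, hprev, hlastv, hEmp, h0j, Bool.and_true, Bool.not_false]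
      cases hA : PySem.Str.startswith (PySem.Str.strip c) "##" <;>
        cases hB1 : (PySem.Str.strip p != "") <;>
        cases hB2 : (!PySem.Str.startswith (PySem.Str.strip p) "##") <;>
        simp only [pvNeed, hA, hB1, hB2, Bool.and_true, Bool.and_false,
          Bool.and_self, if_true] <;>
        simp [List.append_assoc]
    have hLj : L[j]? = some c := by
      have h : (L.drop j)[0]? = L[j + 0]? := List.getElem?_drop
      rw [hdrop] at h
      simpa using h.symm
    have hdrop' : L.drop (j + 1) = r := by
      rw [← List.tail_drop, hdrop]
      rfl
    have hacc' : acc ++ (if pvNeed p c then ["", c] else [c]) ≠ [] := by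
      cases h : pvNeed p c <;> simp
    have hlast' : (acc ++ (if pvNeed p c then ["", c] else [c])).getLast? = some c := by
      cases h : pvNeed p c <;> simp
    have hrec := ih (j + 1) c (acc ++ (if pvNeed p c then ["", c] else [c]))
      hdrop' (by omega) (by simpa using hLj) hacc' hlast'
    rw [PySem.List.enumerate_cons, List.foldl_cons, hstep]
    have hc1 : ((j : Int) + 1) = ((j + 1 : Nat) : Int) := by push_cast; ring
    rw [hc1, hrec]
    cases h : pvNeed p c <;> simp [pvIns, h, List.append_assoc]

lemma A_eq (text : String) (h : ¬ text = "") :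
    fix_markdown_formatting text
      = PySem.Str.join "\n" (pvCanon ((PySem.Str.split? text "\n").getD [])) := by
  simp only [fix_markdown_formatting, if_neg h]
  generalize (PySem.Str.split? text "\n").getD [] = L
  cases L with
  | nil => simp [PySem.List.enumerate_nil, pvCanon]
  | cons a t =>
    rw [PySem.List.enumerate_cons, List.foldl_cons]
    have h0 : pvStepA (a :: t) [] ((0 : Int), a) = [a] := by
      simp [pvStepA]
    rw [h0]
    have hrec := stepA (a :: t) t 1 a [a] (by simp) (le_refl 1) (by simp) (by simp) (by simp)
    have hc : ((1 : Nat) : Int) = (0 : Int) + 1 := by norm_num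
    rw [hc] at hrec
    rw [hrec]
    simp [pvCanon]

-- ---- joining sections with "\n\n" is joining the glued line list with "\n" ----

lemma join_split (sep : List Char) : ∀ (a : List (List Char)), a ≠ [] →
    ∀ (G : List (List Char)), G ≠ [] →
    PySem.Chars.join sep (a ++ [] :: G)
      = PySem.Chars.join sep a ++ sep ++ sep ++ PySem.Chars.join sep G := by
  intro a
  induction a with
  | nil => intro ha; exact absurd rfl ha
  | cons x a' ih =>
    intro _ G hG
    cases a' with
    | nil =>
      cases G with
      | nil => exact absurd rfl hG
      | cons g G' =>
        rw [show ([x] ++ [] :: g :: G') = x :: [] :: g :: G' from rfl]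
        rw [PySem.Chars.join_cons_cons, PySem.Chars.join_cons_cons,
          PySem.Chars.join_singleton]
        simp [List.append_assoc]
    | cons y a'' =>
      rw [show ((x :: y :: a'') ++ [] :: G) = x :: ((y :: a'') ++ [] :: G) from rfl]
      rw [show ((y :: a'') ++ [] :: G) = y :: (a'' ++ [] :: G) from rfl]
      rw [PySem.Chars.join_cons_cons]
      rw [show (y :: (a'' ++ [] :: G)) = ((y :: a'') ++ [] :: G) from rfl]
      rw [ih (by simp) G hG]
      rw [PySem.Chars.join_cons_cons]
      simp [List.append_assoc]

lemma join_glue : ∀ (S : List (List String)), (∀ sec ∈ S, sec ≠ []) →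
    PySem.Str.join "\n\n" (S.map (fun s => PySem.Str.join "\n" s))
      = PySem.Str.join "\n" (pvGlue S) := by
  intro S
  induction S with
  | nil =>
    intro _
    apply String.ext
    simp [PySem.Str.toList_join, PySem.Chars.join_nil, pvGlue]
  | cons a T ih =>
    intro hne
    cases T with
    | nil =>
      apply String.ext
      simp [PySem.Str.toList_join, PySem.Chars.join_singleton, pvGlue]
    | cons b R =>
      apply String.ext
      have hsub : ∀ sec ∈ b :: R, sec ≠ [] := by
        intro sec hs
        exact hne sec (List.mem_cons_of_mem _ hs)
      have h2 := congrArg String.toList (ih hsub)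
      rw [PySem.Str.toList_join, PySem.Str.toList_join] at h2
      rw [PySem.Str.toList_join, PySem.Str.toList_join]
      simp only [List.map_cons] at h2 ⊢
      rw [PySem.Chars.join_cons_cons, h2]
      have hglue : pvGlue (a :: b :: R) = a ++ "" :: pvGlue (b :: R) := rfl
      rw [hglue]
      have hb : b ≠ [] := hne b (List.mem_cons_of_mem _ (List.mem_cons_self))
      have hGne : (pvGlue (b :: R)).map String.toList ≠ [] := by
        simp [List.map_eq_nil_iff]
        exact pvGlue_cons_ne_nil b R hb
      have ha : (a.map String.toList) ≠ [] := by
        simp [List.map_eq_nil_iff]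
        exact hne a List.mem_cons_self
      rw [List.map_append, List.map_cons]
      rw [show ("" : String).toList = ([] : List Char) from rfl]
      rw [join_split ("\n".toList) (a.map String.toList) ha
        ((pvGlue (b :: R)).map String.toList) hGne]
      rw [PySem.Str.toList_join]
      rw [show ("\n\n" : String).toList = ("\n" : String).toList ++ ("\n" : String).toList from rfl]
      simp [List.append_assoc]

-- ---- B's staged computation produces the canonical line list ----

lemma segfold (L : List String) : ∀ (cuts : List Int) (s : Int) (accL : List (List String)),
    (cuts.foldl (fun (st : Int × List (List String)) c =>
        (c, st.2 ++ [PySem.List.slice L (some st.1) (some c)])) (s, accL)).2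
      ++ [PySem.List.slice L (some ((cuts.foldl (fun (st : Int × List (List String)) c =>
        (c, st.2 ++ [PySem.List.slice L (some st.1) (some c)])) (s, accL)).1)) none]
    = accL ++ pvSeg L s cuts := by
  intro cuts
  induction cuts with
  | nil => intro s accL; simp [pvSeg]
  | cons c cs ih =>
    intro s accL
    rw [List.foldl_cons]
    rw [ih c (accL ++ [PySem.List.slice L (some s) (some c)])]
    simp [pvSeg, List.append_assoc]

lemma pvB_eq (L : List String) (i : Nat) (h1 : 1 ≤ i) (h2 : i < L.length) :
    pvB L (i : Int) = pvNeed (L[i-1]'(by omega)) (L[i]'h2) := by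
  have hc : ((i : Int) - 1) = ((i - 1 : Nat) : Int) := by omega
  simp only [pvB, pvNeed, hc, PySem.List.pyGetD_natCast]
  rw [List.getD_eq_getElem L "" h2, List.getD_eq_getElem L "" (show i - 1 < L.length by omega)]
  cases hA : PySem.Str.startswith (PySem.Str.strip (L[i]'h2)) "##" <;>
    simp

lemma slice_cons_step (L : List String) (s : Nat) (c : Int)
    (hs : s < L.length) (hc : (s : Int) < c) :
    PySem.List.slice L (some (s : Int)) (some c)
      = (L[s]'hs) :: PySem.List.slice L (some ((s : Int) + 1)) (some c) := by
  have hc0 : (0 : Int) ≤ c := by omega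
  have hcc : c = ((c.toNat : Nat) : Int) := by omega
  have hc1 : ((s : Int) + 1) = ((s + 1 : Nat) : Int) := by push_cast; ring
  rw [hcc, hc1, PySem.List.slice_natCast, PySem.List.slice_natCast]
  rw [List.drop_eq_getElem_cons hs]
  have hts : 1 ≤ c.toNat - s := by omega
  rw [show c.toNat - s = (c.toNat - (s + 1)) + 1 by omega]
  rw [List.take_succ_cons]

lemma pvSeg_shift (L : List String) (s : Nat) (hs : s < L.length) (cuts : List Int)
    (hc : ∀ c ∈ cuts, (s : Int) < c) :
    pvGlue (pvSeg L (s : Int) cuts)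
      = (L[s]'hs) :: pvGlue (pvSeg L ((s : Int) + 1) cuts) := by
  cases cuts with
  | nil =>
    have hc1 : ((s : Int) + 1) = ((s + 1 : Nat) : Int) := by push_cast; ring
    simp only [pvSeg, hc1, PySem.List.slice_from_natCast]
    rw [List.drop_eq_getElem_cons hs]
    rfl
  | cons c cs =>
    simp only [pvSeg]
    rw [slice_cons_step L s c hs (hc c (List.mem_cons_self))]
    rw [pvGlue_cons_head]

lemma pvSeg_ne_nil_all (L : List String) : ∀ (cuts : List Int) (s : Nat), s < L.length →
    (∀ c ∈ cuts, (s : Int) < c ∧ c < (L.length : Int)) → cuts.Pairwise (· < ·) →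
    ∀ sec ∈ pvSeg L (s : Int) cuts, sec ≠ [] := by
  intro cuts
  induction cuts with
  | nil =>
    intro s hs _ _ sec hsec
    simp only [pvSeg, PySem.List.slice_from_natCast, List.mem_singleton] at hsec
    subst hsec
    simp [List.drop_eq_nil_iff]
    omega
  | cons c cs ih =>
    intro s hs hb hp sec hsec
    have hcb := hb c (List.mem_cons_self)
    have hcnat : c = ((c.toNat : Nat) : Int) := by omega
    simp only [pvSeg, List.mem_cons] at hsec
    rcases hsec with hsec | hsec
    · subst hsec
      rw [hcnat, PySem.List.slice_natCast]
      intro hnil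
      rw [List.take_eq_nil_iff] at hnil
      rcases hnil with hnil | hnil
      · omega
      · rw [List.drop_eq_nil_iff] at hnil
        omega
    · have hlt : c.toNat < L.length := by omega
      have hb' : ∀ c' ∈ cs, ((c.toNat : Nat) : Int) < c' ∧ c' < (L.length : Int) := by
        intro c' hc'
        refine ⟨?_, (hb c' (List.mem_cons_of_mem _ hc')).2⟩
        have := (List.pairwise_cons.mp hp).1 c' hc'
        omega
      have := ih c.toNat hlt hb' (List.pairwise_cons.mp hp).2 sec (by rw [← hcnat]; exact hsec)
      exact this

lemma bmain (L : List String) : ∀ (k s : Nat), s + k = L.length → ∀ (hs : s < L.length),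
    pvGlue (pvSeg L (s : Int)
        ((PySem.List.pyRange ((s : Int) + 1) (L.length : Int)).filter (pvB L)))
      = (L[s]'hs) :: pvIns (L[s]'hs) (L.drop (s + 1)) := by
  intro k
  induction k with
  | zero => intro s hk hs; omega
  | succ k' ih =>
    intro s hk hs
    by_cases hk0 : k' = 0
    · -- s + 1 = L.length : no further lines, no cuts
      have hnil : (L.length : Int) ≤ (s : Int) + 1 := by omega
      rw [PySem.List.pyRange_one_eq_nil hnil]
      have hdrop : L.drop (s + 1) = [] := by
        rw [List.drop_eq_nil_iff]; omega
      simp only [List.filter_nil, pvSeg, PySem.List.slice_from_natCast, hdrop, pvIns]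
      rw [List.drop_eq_getElem_cons hs, hdrop]
      rfl
    · have h1 : ((s : Int) + 1) < (L.length : Int) := by omega
      have hs1 : s + 1 < L.length := by omega
      have hcast : ((s : Int) + 1) = ((s + 1 : Nat) : Int) := by push_cast; ring
      rw [PySem.List.pyRange_one_cons h1, List.filter_cons]
      rw [hcast]
      have hdropc : L.drop (s + 1) = (L[s+1]'hs1) :: L.drop (s + 2) := by
        rw [List.drop_eq_getElem_cons hs1]
      have hihres := ih (s + 1) (by omega) hs1
      rw [show ((s + 1 : Nat) : Int) + 1 = ((s + 1 + 1 : Nat) : Int) by push_cast; ring] at hihres ⊢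
      have hneed : pvB L ((s + 1 : Nat) : Int) = pvNeed (L[s]'hs) (L[s+1]'hs1) := by
        have := pvB_eq L (s + 1) (by omega) hs1
        simpa using this
      by_cases hb : pvB L ((s + 1 : Nat) : Int) = true
      · rw [if_pos hb]
        simp only [pvSeg]
        have hslice : PySem.List.slice L (some (s : Int)) (some ((s + 1 : Nat) : Int))
            = [L[s]'hs] := by
          rw [slice_cons_step L s _ hs (by push_cast; omega)]
          rw [hcast, PySem.List.slice_natCast]
          simp
        rw [hslice]
        rw [pvGlue_cons _ _ (pvSeg_ne_nil L _ _)]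
        rw [hihres]
        rw [hdropc]
        have : pvNeed (L[s]'hs) (L[s+1]'hs1) = true := by rw [← hneed]; exact hb
        simp [pvIns, this]
      · rw [if_neg hb]
        have hmem : ∀ c ∈ (PySem.List.pyRange ((s + 1 + 1 : Nat) : Int)
            (L.length : Int)).filter (pvB L), (s : Int) < c := by
          intro c hcmem
          have := (List.mem_filter.mp hcmem).1
          rw [PySem.List.mem_pyRange_one] at this
          omega
        rw [pvSeg_shift L s hs _ hmem]
        rw [hcast, hihres]
        rw [hdropc]
        have : pvNeed (L[s]'hs) (L[s+1]'hs1) = false := by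
          rw [← hneed]
          exact Bool.eq_false_iff.mpr hb
        simp [pvIns, this]

lemma B_eq (text : String) (h : ¬ text = "") :
    fix_markdown_formatting_alt text
      = PySem.Str.join "\n" (pvCanon ((PySem.Str.split? text "\n").getD [])) := by
  simp only [fix_markdown_formatting_alt, if_neg h]
  generalize (PySem.Str.split? text "\n").getD [] = L
  rw [PySem.List.foldl_append_if_eq_filter]
  rw [List.nil_append]
  rw [segfold L _ 0 []]
  rw [List.nil_append]
  cases L with
  | nil => decide
  | cons a t =>
    have hcuts : ∀ c ∈ (PySem.List.pyRange 1 ((a :: t).length : Int)).filter (pvB (a :: t)),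
        ((0 : Nat) : Int) < c ∧ c < ((a :: t).length : Int) := by
      intro c hcmem
      have := (List.mem_filter.mp hcmem).1
      rw [PySem.List.mem_pyRange_one] at this
      constructor <;> omega
    have hpw : ((PySem.List.pyRange 1 ((a :: t).length : Int)).filter (pvB (a :: t))).Pairwise (· < ·) :=
      List.Pairwise.filter _ (PySem.List.pairwise_lt_pyRange_one 1 ((a :: t).length : Int))
    have hlen : (0 : Nat) < (a :: t).length := by simp
    have hsecs := pvSeg_ne_nil_all (a :: t) _ 0 hlen hcuts hpw
    rw [join_glue _ (by simpa using hsecs)]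
    have hb := bmain (a :: t) (a :: t).length 0 (by omega) hlen
    simp only [Nat.cast_zero, zero_add, List.getElem_cons_zero, List.drop_succ_cons,
      List.drop_zero] at hb
    rw [hb]
    simp [pvCanon]

-- ===== VERDICT (by name: the statement is the Claim_ definition above) =====
theorem fix_markdown_formatting_spec : Claim_equal_fix_markdown_formatting := by
  intro text _
  unfold Spec_fix_markdown_formatting
  by_cases h : text = ""
  · simp [fix_markdown_formatting, fix_markdown_formatting_alt, h]
  · rw [A_eq text h, B_eq text h]
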